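-- pv_equiv track=rewrite | github.com/mopuchlik/toolkit_python | projects/mTSP/mTSP_grid_search.py | generate_partitions
-- ===== SOURCE A (Python) =====
-- def generate_partitions(cities, num_agents):
--     """Generate all possible partitions of cities among agents."""
--
--     def helper(cities, k):
--         if k == 1:
--             yield [cities]
--         else:
--             for i in range(1, len(cities)):
--                 for tail in helper(cities[i:], k - 1):
--                     yield [cities[:i]] + tail
--
--     return helper(cities, num_agents)
-- ===== SOURCE B (Python) =====
-- def generate_partitions(cities, num_agents):
--     """Generate all possible partitions of cities among agents.
--
--     Instead of recursing on list suffixes (and re-slicing the remainder at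
--     every level like A), choose the num_agents-1 cut positions directly and
--     slice the city list once per partition.
--     """
--
--     n = len(cities)
--
--     def cut_combos(start, r):
--         # all increasing r-tuples of cut positions drawn from range(start, n)
--         if r == 0:
--             yield ()
--             return
--         for c in range(start, n):
--             for rest in cut_combos(c + 1, r - 1):
--                 yield (c,) + rest
--
--     def gen():
--         if num_agents <= 0:
--             return
--         for cuts in cut_combos(1, num_agents - 1):
--             prev = 0
--             blocks = []
--             for c in cuts:
--                 blocks.append(cities[prev:c])
--                 prev = c
--             blocks.append(cities[prev:])
--             yield blocks
--
--     return gen()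
-- ===== Notes on version B (the rewrite author's own statement) =====
-- stated objective: alternative
-- what changed: Replaces A's suffix recursion (which repeatedly slices the remaining city list and prepends the head block at every recursion level) by direct enumeration of the k-1 cut positions, slicing the original list once between consecutive cuts per emitted partition.
import Mathlib
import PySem

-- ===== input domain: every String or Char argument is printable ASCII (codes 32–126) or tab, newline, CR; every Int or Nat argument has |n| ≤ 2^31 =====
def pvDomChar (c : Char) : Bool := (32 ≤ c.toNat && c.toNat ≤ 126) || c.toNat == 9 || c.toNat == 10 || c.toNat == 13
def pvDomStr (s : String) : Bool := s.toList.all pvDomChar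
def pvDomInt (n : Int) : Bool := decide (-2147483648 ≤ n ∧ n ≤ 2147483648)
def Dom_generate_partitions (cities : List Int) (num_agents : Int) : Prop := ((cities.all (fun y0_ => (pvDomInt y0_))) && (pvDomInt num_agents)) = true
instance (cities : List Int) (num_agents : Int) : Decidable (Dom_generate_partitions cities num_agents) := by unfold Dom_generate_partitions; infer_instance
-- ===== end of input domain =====

-- B enumerates the cut positions directly instead of A's suffix recursion (objective: alternative).
-- Both Pythons return a generator; equivalence is about the list of yielded values, in order.

-- ===== PORT A =====
-- helper(cities, k): list of yielded values, in order.
def gpHelperA (cities : List Int) (k : Int) : List (List (List Int)) :=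
  if k = 1 then [[cities]]
  else
    (PySem.List.pyRange 1 cities.length 1).attach.flatMap (fun x =>
      (gpHelperA (PySem.List.slice cities (some x.1) none) (k - 1)).map
        (fun tail => (PySem.List.slice cities none (some x.1)) :: tail))
termination_by cities.length
decreasing_by
  have hx := x.2
  rw [PySem.List.mem_pyRange_one] at hx
  rw [PySem.List.slice_from _ (by omega)]
  simp only [List.length_drop]
  omega

def generate_partitions (cities : List Int) (num_agents : Int) : List (List (List Int)) :=
  gpHelperA cities num_agents

-- ===== PORT B =====
-- cut_combos(start, r) from Source B: increasing r-tuples of cuts from range(start, n).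
-- Python's range(start, n) of nonnegative ints is ported as List.range' start (n - start).
def gpCombos (n : Nat) (start : Nat) (r : Nat) : List (List Nat) :=
  match r with
  | 0 => [[]]
  | r' + 1 =>
    (List.range' start (n - start)).flatMap (fun c => (gpCombos n (c + 1) r').map (c :: ·))

-- the inner block-building loop of Source B (cities[prev:c] = (cities.drop prev).take (c - prev))
def gpBlocks (cities : List Int) (prev : Nat) (cuts : List Nat) : List (List Int) :=
  match cuts with
  | [] => [cities.drop prev]
  | c :: cs => ((cities.drop prev).take (c - prev)) :: gpBlocks cities c cs

def generate_partitions_alt (cities : List Int) (num_agents : Int) : List (List (List Int)) :=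
  if num_agents ≤ 0 then []
  else (gpCombos cities.length 1 (num_agents - 1).toNat).map (gpBlocks cities 0)

-- ===== PRECONDITION & SPEC =====
def Spec_generate_partitions (cities : List Int) (num_agents : Int) (out : List (List (List Int))) : Prop := out = generate_partitions_alt cities num_agents
instance (cities : List Int) (num_agents : Int) (out : List (List (List Int))) : Decidable (Spec_generate_partitions cities num_agents out) := by unfold Spec_generate_partitions; infer_instance

-- ===== CLAIM (what is proved, stated in full; the proofs are below) =====
def Claim_equal_generate_partitions : Prop := ∀ (cities : List Int) (num_agents : Int), Dom_generate_partitions cities num_agents → Spec_generate_partitions cities num_agents (generate_partitions cities num_agents)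

-- ===== LEMMAS AND PROOFS =====

-- the flatMap body of gpHelperA depends only on the value of the attached element
lemma flatMap_attach_eq (l : List Int) (g : Int → List (List (List Int))) :
    l.attach.flatMap (fun x => g x.1) = l.flatMap g := by
  conv_rhs => rw [← List.attach_map_subtype_val l]
  rw [List.flatMap_map]

-- unfolding lemma for gpHelperA in the recursive case, with the attach removed
lemma gpHelperA_eq (cities : List Int) (k : Int) (hk : k ≠ 1) :
    gpHelperA cities k = (PySem.List.pyRange 1 cities.length 1).flatMap (fun i =>
      (gpHelperA (PySem.List.slice cities (some i) none) (k - 1)).map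
        (fun tail => (PySem.List.slice cities none (some i)) :: tail)) := by
  rw [gpHelperA, if_neg hk]
  exact flatMap_attach_eq (PySem.List.pyRange 1 cities.length 1) (fun i =>
    (gpHelperA (PySem.List.slice cities (some i) none) (k - 1)).map
      (fun tail => (PySem.List.slice cities none (some i)) :: tail))

-- for k ≤ 0 the Python helper recurses until the list is too short and yields nothing
lemma gpHelperA_nonpos : ∀ (n : Nat) (cities : List Int), cities.length = n →
    ∀ k : Int, k ≤ 0 → gpHelperA cities k = [] := by
  intro n
  induction n using Nat.strong_induction_on with
  | _ n ih =>
    intro cities hn k hk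
    rw [gpHelperA_eq cities k (by omega)]
    rw [List.flatMap_eq_nil_iff]
    intro i hi
    rw [PySem.List.mem_pyRange_one] at hi
    rw [List.map_eq_nil_iff]
    rw [PySem.List.slice_from _ (by omega)]
    exact ih (cities.drop i.toNat).length (by simp only [List.length_drop]; omega) _ rfl
      (k - 1) (by omega)

lemma rangeShift (i : Nat) : ∀ (m a : Nat), List.range' (a + i) m = (List.range' a m).map (· + i) := by
  intro m
  induction m with
  | zero => intro a; simp
  | succ m ihm =>
    intro a
    rw [List.range'_succ, List.range'_succ, List.map_cons, ← ihm (a + 1),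
      show a + i + 1 = a + 1 + i from by omega]

lemma combosShift (r : Nat) : ∀ (n i start : Nat),
    gpCombos n (start + i) r = (gpCombos (n - i) start r).map (List.map (· + i)) := by
  induction r with
  | zero => intro n i start; simp [gpCombos]
  | succ r' ihr =>
    intro n i start
    rw [gpCombos, gpCombos]
    rw [show n - (start + i) = n - i - start from by omega,
      rangeShift i (n - i - start) start, List.flatMap_map, List.map_flatMap]
    apply List.flatMap_congr
    intro c _
    rw [show c + i + 1 = (c + 1) + i from by omega, ihr n i (c + 1)]
    simp [List.map_map, Function.comp_def]

lemma blocksShift (cities : List Int) (i : Nat) :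
    ∀ (cs : List Nat) (prev : Nat),
      gpBlocks cities (prev + i) (cs.map (· + i)) = gpBlocks (cities.drop i) prev cs := by
  intro cs
  induction cs with
  | nil =>
    intro prev
    simp only [List.map_nil, gpBlocks]
    rw [List.drop_drop, Nat.add_comm i prev]
  | cons c cs ihc =>
    intro prev
    simp only [List.map_cons, gpBlocks]
    refine congrArg₂ List.cons ?_ (ihc c)
    rw [List.drop_drop, show i + prev = prev + i from by omega,
      show c + i - (prev + i) = c - prev from by omega]

lemma gpHelperA_main (k : Nat) : ∀ (cities : List Int),
    gpHelperA cities ((k : Int) + 1) = (gpCombos cities.length 1 k).map (gpBlocks cities 0) := by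
  induction k with
  | zero =>
    intro cities
    rw [gpHelperA, if_pos (by omega)]
    simp [gpCombos, gpBlocks]
  | succ k ihk =>
    intro cities
    rw [gpHelperA_eq cities _ (by omega)]
    simp only [show (((k + 1 : Nat) : Int) + 1 - 1) = (k : Int) + 1 from by push_cast; ring]
    rw [PySem.List.pyRange_one, gpCombos]
    rw [show List.range' 1 (cities.length - 1) =
        (List.range (((cities.length : Int) - 1)).toNat).map (fun j => 1 + j) from by
      rw [show (((cities.length : Int) - 1)).toNat = cities.length - 1 from by omega,
        List.range'_eq_map_range]]
    rw [List.map_flatMap, List.flatMap_map, List.flatMap_map]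
    apply List.flatMap_congr
    intro j _
    rw [show (1 : Int) + (j : Int) = ((1 + j : Nat) : Int) from by push_cast; ring]
    rw [PySem.List.slice_from_natCast, PySem.List.slice_to_natCast]
    rw [ihk (cities.drop (1 + j))]
    rw [show 1 + j + 1 = 1 + (1 + j) from by omega, combosShift k cities.length (1 + j) 1]
    simp only [List.map_map]
    rw [List.length_drop]
    apply List.map_congr_left
    intro cs _
    simp only [Function.comp_def, gpBlocks, List.drop_zero, Nat.sub_zero]
    refine congrArg₂ List.cons rfl ?_
    have h := blocksShift cities (1 + j) cs 0
    rw [Nat.zero_add] at h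
    exact h.symm

-- ===== VERDICT (by name: the statement is the Claim_ definition above) =====
theorem generate_partitions_spec : Claim_equal_generate_partitions := by
  intro cities num_agents _
  unfold Spec_generate_partitions generate_partitions generate_partitions_alt
  by_cases h : num_agents ≤ 0
  · rw [if_pos h]
    exact gpHelperA_nonpos cities.length cities rfl num_agents h
  · rw [if_neg h]
    have hk : num_agents = ((num_agents - 1).toNat : Int) + 1 := by omega
    have hmain := gpHelperA_main (num_agents - 1).toNat cities
    rw [← hk] at hmain
    exact hmain
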